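-- pv_equiv track=rewrite | github.com/sgoep2/request-scrapper | scripts/indeed_webscrape.py | create_dictionary_with_values
-- ===== SOURCE A (Python) =====
-- from collections import defaultdict
--
-- def create_dictionary_with_values(job_qualifications):
--     # create dictionary with values as lists
--     dct_lst = defaultdict(list)
--     for i in job_qualifications:
--         dct_lst[i[0]].append(i[1])
--
--     list_with_index = []
--     for i in dct_lst.values():  # string join: lists of lists of strings
--         list_with_index.append(''.join(i))
--
--     # one entry of our qualification text:
--     # u[2]
--     return list_with_index
-- ===== SOURCE B (Python) =====
-- def create_dictionary_with_values(job_qualifications):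
--     # no dict: collect distinct keys in first-occurrence order,
--     # then build each output string by filtering the whole input per key
--     keys = []
--     for i in job_qualifications:
--         if i[0] not in keys:
--             keys.append(i[0])
--     return [''.join(i[1] for i in job_qualifications if i[0] == k) for k in keys]
-- ===== Notes on version B (the rewrite author's own statement) =====
-- stated objective: alternative
-- what changed: Drops the dictionary entirely: collects distinct keys in first-occurrence order, then for each key rescans the input and joins the matching values, trading A's one-pass grouping for a key-list plus nested filter passes.
import Mathlib
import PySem

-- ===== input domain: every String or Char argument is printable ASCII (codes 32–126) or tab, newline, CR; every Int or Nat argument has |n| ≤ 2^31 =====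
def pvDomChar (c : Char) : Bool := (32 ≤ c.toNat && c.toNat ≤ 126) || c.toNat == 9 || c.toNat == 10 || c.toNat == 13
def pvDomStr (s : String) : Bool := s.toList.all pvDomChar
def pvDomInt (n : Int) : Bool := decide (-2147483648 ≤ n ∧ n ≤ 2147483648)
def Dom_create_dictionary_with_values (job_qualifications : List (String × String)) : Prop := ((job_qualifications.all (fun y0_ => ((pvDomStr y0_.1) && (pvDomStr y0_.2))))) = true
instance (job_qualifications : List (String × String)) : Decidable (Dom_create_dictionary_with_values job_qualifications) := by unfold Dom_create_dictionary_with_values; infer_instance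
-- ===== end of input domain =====

-- B is an alternative: no dictionary at all — collect distinct keys in first-occurrence
-- order, then build each output string by a per-key filter-and-join over the whole input.

-- ===== PORT A =====
-- defaultdict(list): dct_lst[i[0]].append(i[1]) = modify at i[0] with default []
def create_dictionary_with_values (job_qualifications : List (String × String)) : List String :=
  let dct_lst := job_qualifications.foldl
    (fun d i => d.modify i.1 [] (fun l => l ++ [i.2])) PySem.Dict.empty
  dct_lst.values.foldl (fun acc i => acc ++ [PySem.Str.join "" i]) []

-- ===== PORT B =====
-- 'if i[0] not in keys: keys.append(i[0])' is exactly PySem.Set.add (definitional)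
def create_dictionary_with_values_alt (job_qualifications : List (String × String)) : List String :=
  let keys := job_qualifications.foldl (fun ks i => PySem.Set.add ks i.1) []
  keys.map (fun k =>
    PySem.Str.join "" ((job_qualifications.filter (fun i => i.1 == k)).map (fun i => i.2)))

-- ===== PRECONDITION & SPEC =====
def Spec_create_dictionary_with_values (job_qualifications : List (String × String)) (out : List String) : Prop := out = create_dictionary_with_values_alt job_qualifications
instance (job_qualifications : List (String × String)) (out : List String) : Decidable (Spec_create_dictionary_with_values job_qualifications out) := by unfold Spec_create_dictionary_with_values; infer_instance

-- ===== CLAIM (what is proved, stated in full; the proofs are below) =====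
def Claim_equal_create_dictionary_with_values : Prop := ∀ (job_qualifications : List (String × String)), Dom_create_dictionary_with_values job_qualifications → Spec_create_dictionary_with_values job_qualifications (create_dictionary_with_values job_qualifications)

-- ===== LEMMAS AND PROOFS =====

-- A's second loop (append one element at a time) is a map
theorem pv_foldl_append_map {α β : Type} (f : α → β) (l : List α) (acc : List β) :
    l.foldl (fun acc i => acc ++ [f i]) acc = acc ++ l.map f := by
  induction l generalizing acc with
  | nil => simp
  | cons x xs ih => simp [List.foldl, ih]

-- the core equality: A's dict values, joined, are B's per-key filtered joins
theorem pv_main (jq : List (String × String)) :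
    (jq.foldl (fun d i => d.modify i.1 [] (fun l => l ++ [i.2])) PySem.Dict.empty).values.map
        (fun i => PySem.Str.join "" i) =
    (jq.foldl (fun ks i => PySem.Set.add ks i.1) []).map (fun k =>
      PySem.Str.join "" ((jq.filter (fun i => i.1 == k)).map (fun i => i.2))) := by
  set F := jq.foldl (fun d i => d.modify i.1 [] (fun l => l ++ [i.2])) PySem.Dict.empty with hF
  have hnF : F.keys.Nodup := PySem.Dict.nodup_keys_foldl_modify_key jq Prod.fst _ _ _ (by simp)
  have hkF : F.keys = PySem.Set.update PySem.Dict.empty.keys (jq.map Prod.fst) :=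
    PySem.Dict.keys_foldl_modify_key jq Prod.fst _ _ _
  have hkB : (jq.foldl (fun ks i => PySem.Set.add ks i.1) []) =
      PySem.Set.update ([] : List String) (jq.map Prod.fst) := by
    rw [PySem.Set.update_map_eq_foldl_add]
  rw [PySem.Dict.values_eq_map_keys F hnF [], hkF, List.map_map, hkB]
  have hke : (PySem.Dict.empty : PySem.Dict String (List String)).keys = ([] : List String) := rfl
  rw [hke]
  apply List.map_congr_left
  intro k _
  simp only [Function.comp]
  rw [hF, PySem.Dict.getD_foldl_modify_append]
  simp

-- ===== VERDICT (by name: the statement is the Claim_ definition above) =====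
theorem create_dictionary_with_values_spec : Claim_equal_create_dictionary_with_values := by
  intro jq _
  unfold Spec_create_dictionary_with_values create_dictionary_with_values create_dictionary_with_values_alt
  rw [pv_foldl_append_map]
  simpa using pv_main jq
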